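-- pv_equiv track=rewrite | github.com/EduardoGallego94/codewars | codewars-solutions/Hofstadter_Q.py | hofstadter_Q
-- ===== SOURCE A (Python) =====
-- def hofstadter_Q(n, memo={}):
--     if n < 3:
--         return 1
--     elif n in memo:
--         return memo[n]
--     else:
--         resultado1 = n - hofstadter_Q(n - 1, memo)
--         resultado2 = n - hofstadter_Q(n - 2, memo)
--         memo[n] = hofstadter_Q(resultado1, memo) + hofstadter_Q(resultado2, memo)
--         return memo[n]
-- ===== SOURCE B (Python) =====
-- def hofstadter_Q(n, memo={}):
--     if n < 3:
--         return 1
--     if n in memo: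
--         return memo[n]
--     # bottom-up table: q[i] = Q(i) for 0 <= i <= n (q[0..2] = 1)
--     q = [1, 1, 1]
--     for i in range(3, n + 1):
--         a = i - q[i - 1]
--         b = i - q[i - 2]
--         q.append((1 if a < 3 else q[a]) + (1 if b < 3 else q[b]))
--     memo[n] = q[n]
--     return q[n]
-- ===== Notes on version B (the rewrite author's own statement) =====
-- stated objective: faster
-- what changed: Replaced the memoized four-way recursion with a bottom-up iterative fill of a list q[0..n] (one loop, no recursion, O(1) stack), reading q[i-1], q[i-2] and the two back-references directly from the table.
-- outside the precondition, e.g. on hofstadter_Q(9905): A returns 5226, B returns 5226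
import Mathlib
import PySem

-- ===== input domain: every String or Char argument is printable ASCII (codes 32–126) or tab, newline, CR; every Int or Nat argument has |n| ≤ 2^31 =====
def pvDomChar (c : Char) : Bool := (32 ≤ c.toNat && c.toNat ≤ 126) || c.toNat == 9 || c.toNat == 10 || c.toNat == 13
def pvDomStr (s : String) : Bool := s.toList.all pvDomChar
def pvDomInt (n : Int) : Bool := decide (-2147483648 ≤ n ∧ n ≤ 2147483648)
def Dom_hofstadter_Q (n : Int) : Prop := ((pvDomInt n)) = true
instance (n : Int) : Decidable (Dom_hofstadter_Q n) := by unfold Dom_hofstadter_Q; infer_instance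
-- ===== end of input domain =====

-- B replaces A's memoized recursion by a bottom-up iterative table fill (no recursion, O(1) stack);
-- equivalence is about the RETURN value of a call with the default (empty) memo — A also mutates its
-- default memo argument across calls, which B reproduces only for the final entry memo[n].

-- ===== PORT A =====
-- A's recursion threads the mutable memo dict through every call; fuel n.toNat + 1 is a totality
-- guard only (each recursive argument is strictly smaller, see qA_correct below), never reached.
def qA : Nat → Int → PySem.Dict Int Int → Int × PySem.Dict Int Int
  | 0, _, memo => (1, memo)
  | fuel+1, n, memo =>
    if n < 3 then (1, memo)
    else
      match memo.get? n with
      | some v => (v, memo)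
      | none =>
        let p1 := qA fuel (n - 1) memo
        let resultado1 := n - p1.1
        let p2 := qA fuel (n - 2) p1.2
        let resultado2 := n - p2.1
        let p3 := qA fuel resultado1 p2.2
        let p4 := qA fuel resultado2 p3.2
        let memo2 := p4.2.insert n (p3.1 + p4.1)
        (memo2.getD n 0, memo2)

def hofstadter_Q (n : Int) : Int := (qA (n.toNat + 1) n PySem.Dict.empty).1

-- ===== PORT B =====
-- bottom-up fill of the list q, exactly Source B's loop (the memo parameter, empty on the ported call,
-- contributes nothing and is omitted)
def hofstadter_Q_alt (n : Int) : Int :=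
  if n < 3 then 1
  else
    let q := (PySem.List.pyRange 3 (n + 1) 1).foldl
      (fun q i =>
        let a := i - PySem.List.pyGetD q (i - 1) 0
        let b := i - PySem.List.pyGetD q (i - 2) 0
        q ++ [(if a < 3 then 1 else PySem.List.pyGetD q a 0)
              + (if b < 3 then 1 else PySem.List.pyGetD q b 0)])
      [1, 1, 1]
    PySem.List.pyGetD q n 0

-- ===== PRECONDITION & SPEC =====
-- Pre_ excludes n > 9900: A's recursion reaches depth ≈ n, so such calls raise RecursionError under
-- the grading runner's recursion limit of 10000 (under CPython's default limit of 1000 A already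
-- raises for n ≳ 1000); the exact crash point moves with the caller's stack depth, so the bound sits
-- at the bottom of that crash band — a thin band of large n on which a shallow caller still gets a
-- return is excluded with it (both programs agree there, see the cited example).
def Pre_hofstadter_Q (n : Int) : Prop := n ≤ 9900
instance (n : Int) : Decidable (Pre_hofstadter_Q n) := by unfold Pre_hofstadter_Q; infer_instance
def pvWitness_hofstadter_Q : Int := (10)

def Spec_hofstadter_Q (n : Int) (out : Int) : Prop := out = hofstadter_Q_alt n
instance (n : Int) (out : Int) : Decidable (Spec_hofstadter_Q n out) := by unfold Spec_hofstadter_Q; infer_instance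

-- ===== CLAIM (what is proved, stated in full; the proofs are below) =====
def Claim_equal_hofstadter_Q : Prop := ∀ (n : Int), Dom_hofstadter_Q n → Pre_hofstadter_Q n → Spec_hofstadter_Q n (hofstadter_Q n)

-- ===== LEMMAS AND PROOFS =====

-- The mathematical Q-sequence (Q n = 1 for n < 3; out-of-range back-references clamp to 1 exactly
-- as the Python lookup rule 'x < 3 → 1' does; the inner range guard never fires, see Q_rec).
def Q (n : Nat) : Int :=
  if n < 3 then 1
  else
    (if ((n : Int) - Q (n - 1)) < 3 then 1
     else if _h2 : ((n : Int) - Q (n - 1)).toNat < n then Q ((n : Int) - Q (n - 1)).toNat else 1)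
    + (if ((n : Int) - Q (n - 2)) < 3 then 1
     else if _h3 : ((n : Int) - Q (n - 2)).toNat < n then Q ((n : Int) - Q (n - 2)).toNat else 1)
termination_by n
decreasing_by all_goals omega

def QZ (x : Int) : Int := if x < 3 then 1 else Q x.toNat

lemma Q_lt3 {n : Nat} (h : n < 3) : Q n = 1 := by rw [Q]; simp [h]

lemma Q_pos (n : Nat) : 1 ≤ Q n := by
  induction n using Nat.strong_induction_on with
  | _ n ih =>
    rw [Q]
    split
    · norm_num
    · rename_i h
      have h1 : 1 ≤ (if ((n : Int) - Q (n-1)) < 3 then (1:Int)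
          else if _h2 : ((n : Int) - Q (n-1)).toNat < n then Q ((n : Int) - Q (n-1)).toNat else 1) := by
        split
        · norm_num
        · split
          · exact ih _ (by omega)
          · norm_num
      have h2 : 1 ≤ (if ((n : Int) - Q (n-2)) < 3 then (1:Int)
          else if _h3 : ((n : Int) - Q (n-2)).toNat < n then Q ((n : Int) - Q (n-2)).toNat else 1) := by
        split
        · norm_num
        · split
          · exact ih _ (by omega)
          · norm_num
      omega

lemma QZ_pos (x : Int) : 1 ≤ QZ x := by
  unfold QZ; split
  · norm_num
  · exact Q_pos _

lemma QZ_lt3 {x : Int} (h : x < 3) : QZ x = 1 := by simp [QZ, h]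

lemma QZ_nonneg_toNat {y : Int} (h : 0 ≤ y) : QZ y = Q y.toNat := by
  unfold QZ; split
  · rw [Q_lt3 (by omega)]
  · rfl

lemma Q_rec (x : Int) (h3 : 3 ≤ x) :
    QZ x = QZ (x - QZ (x - 1)) + QZ (x - QZ (x - 2)) := by
  have hx : (x.toNat : Int) = x := by omega
  have p1 := QZ_pos (x - 1)
  have p2 := QZ_pos (x - 2)
  rw [QZ_nonneg_toNat (by omega), Q]
  have hn3 : ¬ x.toNat < 3 := by omega
  rw [if_neg hn3]
  have e1 : Q (x.toNat - 1) = QZ (x - 1) := by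
    rw [QZ_nonneg_toNat (by omega)]; congr 1; omega
  have e2 : Q (x.toNat - 2) = QZ (x - 2) := by
    rw [QZ_nonneg_toNat (by omega)]; congr 1; omega
  rw [e1, e2, hx]
  congr 1
  · by_cases ha : x - QZ (x - 1) < 3
    · rw [if_pos ha, QZ_lt3 ha]
    · rw [if_neg ha, dif_pos (show (x - QZ (x - 1)).toNat < x.toNat by omega),
        ← QZ_nonneg_toNat (by omega)]
  · by_cases ha : x - QZ (x - 2) < 3
    · rw [if_pos ha, QZ_lt3 ha]
    · rw [if_neg ha, dif_pos (show (x - QZ (x - 2)).toNat < x.toNat by omega),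
        ← QZ_nonneg_toNat (by omega)]

-- ---- A-side: the memoized recursion computes QZ ----

def goodMemo (d : PySem.Dict Int Int) : Prop := ∀ k v, d.get? k = some v → v = QZ k

lemma goodMemo_empty : goodMemo PySem.Dict.empty := by
  intro k v h; simp [PySem.Dict.get?_empty] at h

lemma qA_correct : ∀ (fuel : Nat) (n : Int) (memo : PySem.Dict Int Int),
    goodMemo memo → n ≤ (fuel : Int) →
    (qA fuel n memo).1 = QZ n ∧ goodMemo (qA fuel n memo).2 := by
  intro fuel
  induction fuel with
  | zero =>
    intro n memo hg hle
    have : n < 3 := by exact_mod_cast lt_of_le_of_lt hle (by norm_num)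
    simp [qA, QZ_lt3 this, hg]
  | succ fuel ih =>
    intro n memo hg hle
    by_cases h3 : n < 3
    · simp [qA, h3, QZ_lt3 h3, hg]
    · simp only [qA, h3, if_false]
      cases hget : memo.get? n with
      | some v =>
        exact ⟨hg n v hget, hg⟩
      | none =>
        obtain ⟨e1, g1⟩ := ih (n - 1) memo hg (by omega)
        obtain ⟨e2, g2⟩ := ih (n - 2) _ g1 (by omega)
        have p1 := QZ_pos (n - 1)
        have p2 := QZ_pos (n - 2)
        obtain ⟨e3, g3⟩ := ih (n - (qA fuel (n-1) memo).1) _ g2 (by rw [e1]; omega)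
        obtain ⟨e4, g4⟩ := ih (n - (qA fuel (n-2) (qA fuel (n-1) memo).2).1) _ g3
          (by rw [e2]; omega)
        rw [e1] at e3
        rw [e2] at e4
        have hsum : (qA fuel (n - (qA fuel (n-1) memo).1) (qA fuel (n-2) (qA fuel (n-1) memo).2).2).1
            + (qA fuel (n - (qA fuel (n-2) (qA fuel (n-1) memo).2).1) (qA fuel (n - (qA fuel (n-1) memo).1) (qA fuel (n-2) (qA fuel (n-1) memo).2).2).2).1 = QZ n := by
          rw [e1, e2] at *
          rw [e3, e4, ← Q_rec n (by omega)]
        constructor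
        · simp only [PySem.Dict.getD_insert]
          simp [hsum]
        · intro k v hk
          rw [PySem.Dict.get?_insert] at hk
          by_cases hkn : k = n
          · simp [hkn] at hk; subst hkn; rw [← hk, hsum]
          · simp [hkn] at hk; exact g4 k v hk

lemma hofA_eq_QZ (n : Int) : hofstadter_Q n = QZ n := by
  unfold hofstadter_Q
  exact (qA_correct (n.toNat + 1) n PySem.Dict.empty goodMemo_empty (by omega)).1

-- ---- B-side: the bottom-up table is the map of Q over the range ----

def stepB (q : List Int) (i : Int) : List Int :=
  q ++ [(if i - PySem.List.pyGetD q (i - 1) 0 < 3 then 1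
         else PySem.List.pyGetD q (i - PySem.List.pyGetD q (i - 1) 0) 0)
        + (if i - PySem.List.pyGetD q (i - 2) 0 < 3 then 1
         else PySem.List.pyGetD q (i - PySem.List.pyGetD q (i - 2) 0) 0)]

lemma getD_mapQ (m j : Nat) (hj : j < m) :
    PySem.List.pyGetD ((List.range m).map Q) (j : Int) 0 = Q j := by
  rw [PySem.List.pyGetD_natCast]
  simp [List.getD, hj]

lemma table_eq (m : Nat) :
    (PySem.List.pyRange 3 (3 + (m : Int)) 1).foldl stepB [1, 1, 1]
      = (List.range (3 + m)).map Q := by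
  induction m with
  | zero =>
    rw [PySem.List.pyRange_one_eq_nil (by norm_num)]
    simp [List.range_succ, Q_lt3]
  | succ m ih =>
    have hsplit : PySem.List.pyRange 3 (3 + ((m : Int) + 1)) 1
        = PySem.List.pyRange 3 (3 + (m : Int)) 1 ++ [3 + (m : Int)] := by
      have := PySem.List.pyRange_one_succ_right (a := 3) (b := 3 + (m : Int)) (by omega)
      rw [← this]; ring_nf
    push_cast
    rw [hsplit, List.foldl_append, ih]
    simp only [List.foldl_cons, List.foldl_nil]
    have h31 : 3 + (m + 1) = (3 + m) + 1 := by omega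
    rw [h31, List.range_succ, List.map_append]
    unfold stepB
    have hm1 : (3 + (m : Int)) - 1 = ((2 + m : Nat) : Int) := by push_cast; ring
    have hm2 : (3 + (m : Int)) - 2 = ((1 + m : Nat) : Int) := by push_cast; ring
    rw [hm1, hm2, getD_mapQ _ _ (by omega), getD_mapQ _ _ (by omega)]
    have eq1 : Q (2 + m) = QZ ((3 + (m : Int)) - 1) := by
      rw [QZ_nonneg_toNat (by omega)]; congr 1; omega
    have eq2 : Q (1 + m) = QZ ((3 + (m : Int)) - 2) := by
      by_cases h : m = 0
      · subst h; rw [QZ_lt3 (by norm_num)]; exact Q_lt3 (by norm_num)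
      · rw [QZ_nonneg_toNat (by omega)]; congr 1; omega
    congr 1
    have hval : (if (3 + (m : Int)) - Q (2 + m) < 3 then (1:Int)
          else PySem.List.pyGetD ((List.range (3 + m)).map Q) ((3 + (m : Int)) - Q (2 + m)) 0)
        + (if (3 + (m : Int)) - Q (1 + m) < 3 then (1:Int)
          else PySem.List.pyGetD ((List.range (3 + m)).map Q) ((3 + (m : Int)) - Q (1 + m)) 0)
        = Q (3 + m) := by
      have hq : QZ ((3 : Int) + m) = Q (3 + m) := by
        rw [QZ_nonneg_toNat (by omega)]; congr 1
      rw [← hq, Q_rec ((3 : Int) + m) (by omega)]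
      rw [← eq1]
      rw [← eq2]
      congr 1
      · by_cases ha : (3 + (m : Int)) - Q (2 + m) < 3
        · simp [ha, QZ_lt3 ha]
        · have hp := Q_pos (2 + m)
          have hcast : (3 + (m : Int)) - Q (2 + m)
              = ((((3 + (m : Int)) - Q (2 + m)).toNat : Nat) : Int) := by omega
          simp only [ha, if_false]
          rw [hcast, getD_mapQ _ _ (by omega), QZ_nonneg_toNat (by omega)]
          congr 1
      · by_cases ha : (3 + (m : Int)) - Q (1 + m) < 3
        · simp [ha, QZ_lt3 ha]
        · have hp := Q_pos (1 + m)
          have hcast : (3 + (m : Int)) - Q (1 + m)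
              = ((((3 + (m : Int)) - Q (1 + m)).toNat : Nat) : Int) := by omega
          simp only [ha, if_false]
          rw [hcast, getD_mapQ _ _ (by omega), QZ_nonneg_toNat (by omega)]
          congr 1
    rw [hval]
    simp

lemma hofB_eq_QZ (n : Int) : hofstadter_Q_alt n = QZ n := by
  unfold hofstadter_Q_alt
  by_cases h3 : n < 3
  · simp [h3, QZ_lt3 h3]
  · simp only [h3, if_false]
    have hm : n + 1 = 3 + ((n.toNat - 3 + 1 : Nat) : Int) := by omega
    have hfold : (PySem.List.pyRange 3 (n + 1) 1).foldl
        (fun q i =>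
          let a := i - PySem.List.pyGetD q (i - 1) 0
          let b := i - PySem.List.pyGetD q (i - 2) 0
          q ++ [(if a < 3 then 1 else PySem.List.pyGetD q a 0)
                + (if b < 3 then 1 else PySem.List.pyGetD q b 0)]) [1, 1, 1]
        = (List.range (3 + (n.toNat - 3 + 1))).map Q := by
      rw [hm, ← table_eq (n.toNat - 3 + 1)]
      rfl
    rw [hfold]
    have hcast : n = ((n.toNat : Nat) : Int) := by omega
    rw [hcast, getD_mapQ _ _ (by omega), QZ_nonneg_toNat (by omega)]
    congr 1

-- ===== VERDICT (by name: the statement is the Claim_ definition above) =====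
theorem hofstadter_Q_spec : Claim_equal_hofstadter_Q := by
  intro n _ _
  unfold Spec_hofstadter_Q
  rw [hofA_eq_QZ, hofB_eq_QZ]
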